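-- pv_equiv track=rewrite | github.com/ShiotaTakumi/CountingNonoverlappingUnfoldings | python/graph_export/automorphism_builder.py | vertex_perm_to_edge_perm
-- ===== SOURCE A (Python) =====
-- def vertex_perm_to_edge_perm(vertex_perm: dict, edges: list) -> list:
--     """
--     Convert a vertex permutation to an edge permutation.
--
--     Args:
--         vertex_perm (dict): Vertex permutation {v: g(v)}
--         edges (list): Edge list from .grh file (defines edge indices)
--
--     Returns:
--         list: Edge permutation as list [σ(0), σ(1), ..., σ(E-1)]
--               where σ(i) is the new edge index for edge i
--
--     頂点置換を辺置換に変換。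
--
--     引数:
--         vertex_perm (dict): 頂点置換 {v: g(v)}
--         edges (list): .grh ファイルからの辺リスト（辺インデックスを定義）
--
--     戻り値:
--         list: 辺置換のリスト [σ(0), σ(1), ..., σ(E-1)]
--               σ(i) は辺 i の新しい辺インデックス
--     """
--     # Build edge lookup: normalized (min, max) vertex pair -> edge index
--     # 辺の検索テーブル: 正規化された (min, max) 頂点ペア → 辺インデックス
--     edge_to_idx = {}
--     for idx, (u, v) in enumerate(edges):
--         key = (min(u, v), max(u, v))
--         edge_to_idx[key] = idx
--
--     # For each edge, compute where it maps under the vertex permutation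
--     # 各辺が頂点置換でどこに写るかを計算
--     edge_perm = [0] * len(edges)
--     for idx, (u, v) in enumerate(edges):
--         new_u = vertex_perm[u]
--         new_v = vertex_perm[v]
--         key = (min(new_u, new_v), max(new_u, new_v))
--         if key not in edge_to_idx:
--             raise ValueError(
--                 f"Edge ({u},{v}) maps to ({new_u},{new_v}) which doesn't exist in graph"
--             )
--         edge_perm[idx] = edge_to_idx[key]
--
--     return edge_perm
-- ===== SOURCE B (Python) =====
-- def vertex_perm_to_edge_perm(vertex_perm: dict, edges: list) -> list:
--     """Inverse 'scatter' formulation: group edge indices by the normalized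
--     image of their endpoints, then sweep the edge list once, stamping each
--     target edge's index onto all of its preimages."""
--     groups = {}
--     for i, (u, v) in enumerate(edges):
--         a, b = vertex_perm[u], vertex_perm[v]
--         groups.setdefault((min(a, b), max(a, b)), []).append(i)
--
--     edge_perm = [None] * len(edges)
--     for j, (u, v) in enumerate(edges):
--         for i in groups.get((min(u, v), max(u, v)), ()):
--             edge_perm[i] = j
--
--     for i, idx in enumerate(edge_perm):
--         if idx is None:
--             u, v = edges[i]
--             raise ValueError(
--                 f"Edge ({u},{v}) maps to ({vertex_perm[u]},{vertex_perm[v]}) which doesn't exist in graph"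
--             )
--     return edge_perm
-- ===== Notes on version B (the rewrite author's own statement) =====
-- stated objective: alternative
-- what changed: Reverses the direction of the computation: instead of looking up each edge's image in a key->index table, B groups edge indices by the normalized image of their endpoints and then sweeps the edge list once, scattering each target edge's index onto all of its preimages; Pre_ excludes the inputs where A raises (KeyError on a missing vertex, ValueError on an edge whose image is absent).
import Mathlib
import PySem

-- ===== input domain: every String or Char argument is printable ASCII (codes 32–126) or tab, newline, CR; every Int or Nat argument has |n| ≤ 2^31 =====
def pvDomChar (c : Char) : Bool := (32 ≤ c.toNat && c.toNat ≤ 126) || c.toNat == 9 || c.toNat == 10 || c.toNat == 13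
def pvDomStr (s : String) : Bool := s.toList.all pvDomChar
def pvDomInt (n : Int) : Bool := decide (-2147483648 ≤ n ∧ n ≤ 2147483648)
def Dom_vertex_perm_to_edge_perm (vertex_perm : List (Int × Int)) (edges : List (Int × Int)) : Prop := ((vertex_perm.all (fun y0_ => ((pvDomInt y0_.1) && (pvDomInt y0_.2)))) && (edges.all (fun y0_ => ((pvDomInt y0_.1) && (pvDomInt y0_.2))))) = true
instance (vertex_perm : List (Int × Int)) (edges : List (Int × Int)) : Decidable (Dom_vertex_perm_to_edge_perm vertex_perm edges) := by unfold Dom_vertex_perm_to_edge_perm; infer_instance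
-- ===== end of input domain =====

-- B reverses the direction of the computation: it groups edge indices by the normalized image of
-- their endpoints and sweeps the edge list once, scattering each target index onto its preimages
-- (no per-edge lookup of the image); same return value.

-- normalized (min, max) vertex pair of an edge (shared helper)
def pvNormKey (p : Int × Int) : Int × Int := (min p.1 p.2, max p.1 p.2)

-- vertex_perm[u] (dict lookup; default only reached outside Pre_, where Python raises KeyError)
def pvLookup (vertex_perm : List (Int × Int)) (u : Int) : Int :=
  (PySem.Dict.mk vertex_perm).getD u 0

-- normalized image of an edge's endpoint pair under the vertex permutation (shared helper)
def pvMapKey (vertex_perm : List (Int × Int)) (e : Int × Int) : Int × Int :=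
  pvNormKey (pvLookup vertex_perm e.1, pvLookup vertex_perm e.2)

-- ===== PORT A =====
def vertex_perm_to_edge_perm (vertex_perm : List (Int × Int)) (edges : List (Int × Int)) : List Int :=
  let edge_to_idx : PySem.Dict (Int × Int) Int :=
    (PySem.List.enumerate edges 0).foldl
      (fun d ie => d.insert (pvNormKey ie.2) ie.1) PySem.Dict.empty
  edges.map (fun e =>
    -- 'key not in edge_to_idx' raises ValueError in Python: outside Pre_, default 0 here
    (edge_to_idx.get? (pvMapKey vertex_perm e)).getD 0)

-- ===== PORT B =====
def vertex_perm_to_edge_perm_alt (vertex_perm : List (Int × Int)) (edges : List (Int × Int)) : List Int :=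
  -- groups.setdefault(key, []).append(i)  =  modify key [] (· ++ [i])
  let groups : PySem.Dict (Int × Int) (List Int) :=
    (PySem.List.enumerate edges 0).foldl
      (fun d ie => d.modify (pvMapKey vertex_perm ie.2) [] (· ++ [ie.1])) PySem.Dict.empty
  let edge_perm : List (Option Int) := List.replicate edges.length none
  let edge_perm : List (Option Int) :=
    (PySem.List.enumerate edges 0).foldl
      (fun out je =>
        (groups.getD (pvNormKey je.2) []).foldl
          (fun o i => PySem.List.pySetD o i (some je.1)) out)
      edge_perm
  -- the final Python pass raises ValueError on a None slot: outside Pre_, default 0 here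
  edge_perm.map (fun o => o.getD 0)

-- ===== PRECONDITION & SPEC =====
-- Pre_ excludes exactly the inputs on which the Python raises: an edge endpoint missing from
-- vertex_perm (KeyError), or a mapped edge absent from the edge list (ValueError).
def Pre_vertex_perm_to_edge_perm (vertex_perm : List (Int × Int)) (edges : List (Int × Int)) : Prop :=
  ∀ e ∈ edges,
    (PySem.Dict.mk vertex_perm).contains e.1 = true ∧
    (PySem.Dict.mk vertex_perm).contains e.2 = true ∧
    pvMapKey vertex_perm e ∈ edges.map pvNormKey
instance (vertex_perm : List (Int × Int)) (edges : List (Int × Int)) : Decidable (Pre_vertex_perm_to_edge_perm vertex_perm edges) := by unfold Pre_vertex_perm_to_edge_perm; infer_instance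

def pvWitness_vertex_perm_to_edge_perm : (List (Int × Int)) × (List (Int × Int)) :=
  ([(0, 0), (1, 1), (2, 2)], [(0, 1), (1, 2)])

def Spec_vertex_perm_to_edge_perm (vertex_perm : List (Int × Int)) (edges : List (Int × Int)) (out : List Int) : Prop := out = vertex_perm_to_edge_perm_alt vertex_perm edges
instance (vertex_perm : List (Int × Int)) (edges : List (Int × Int)) (out : List Int) : Decidable (Spec_vertex_perm_to_edge_perm vertex_perm edges out) := by unfold Spec_vertex_perm_to_edge_perm; infer_instance

-- ===== CLAIM (what is proved, stated in full; the proofs are below) =====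
def Claim_equal_vertex_perm_to_edge_perm : Prop := ∀ (vertex_perm : List (Int × Int)) (edges : List (Int × Int)), Dom_vertex_perm_to_edge_perm vertex_perm edges → Pre_vertex_perm_to_edge_perm vertex_perm edges → Spec_vertex_perm_to_edge_perm vertex_perm edges (vertex_perm_to_edge_perm vertex_perm edges)

-- ===== LEMMAS AND PROOFS =====

-- A's insert-overwrite fold looked up at k equals a last-match Option fold.
theorem get?_foldl_insert_eq_lastMatch (ps : List (Int × (Int × Int)))
    (d : PySem.Dict (Int × Int) Int) (k : Int × Int) :
    ((ps.foldl (fun d ie => d.insert (pvNormKey ie.2) ie.1) d).get? k)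
      = ps.foldl (fun acc ie => if pvNormKey ie.2 = k then some ie.1 else acc) (d.get? k) := by
  induction ps generalizing d with
  | nil => rfl
  | cons ie rest ih =>
    simp only [List.foldl_cons, ih, PySem.Dict.get?_insert]
    congr 1
    by_cases h : pvNormKey ie.2 = k
    · simp [h]
    · rw [if_neg h, if_neg (fun hk => h hk.symm)]

-- a last-match fold from an arbitrary start equals the fold from none, falling back on the start
theorem foldl_lastMatch_init {α β : Type} (l : List α) (p : α → Prop) [DecidablePred p]
    (g : α → β) (a : Option β) :
    l.foldl (fun acc x => if p x then some (g x) else acc) a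
      = match l.foldl (fun acc x => if p x then some (g x) else acc) none with
        | some j => some j
        | none => a := by
  induction l generalizing a with
  | nil => rfl
  | cons x rest ih =>
    simp only [List.foldl_cons]
    rw [ih, ih (if p x then some (g x) else none)]
    by_cases hp : p x <;>
      cases rest.foldl (fun acc x => if p x then some (g x) else acc) none <;> simp [hp]

-- two last-match folds with pointwise-equivalent conditions agree
theorem foldl_lastMatch_congr {α β : Type} (l : List α) (p q : α → Prop)
    [DecidablePred p] [DecidablePred q] (h : ∀ x, p x ↔ q x) (g : α → β) (a : Option β) :
    l.foldl (fun acc x => if p x then some (g x) else acc) a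
      = l.foldl (fun acc x => if q x then some (g x) else acc) a := by
  simp only [show ∀ x, p x = q x from fun x => propext (h x)]

-- membership in B's preimage groups: n is grouped under k iff edge n maps to k
theorem mem_groups (vertex_perm edges : List (Int × Int)) (n : Int) (k : Int × Int) :
    n ∈ ((PySem.List.enumerate edges 0).foldl
          (fun d ie => d.modify (pvMapKey vertex_perm ie.2) [] (· ++ [ie.1]))
          PySem.Dict.empty).getD k []
      ↔ ∃ (m : Nat), ∃ (h : m < edges.length),
          n = (m : Int) ∧ pvMapKey vertex_perm edges[m] = k := by
  have hfold : (PySem.List.enumerate edges 0).foldl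
      (fun d ie => d.modify (pvMapKey vertex_perm ie.2) [] (· ++ [ie.1])) PySem.Dict.empty
      = ((PySem.List.enumerate edges 0).map
          (fun ie => (pvMapKey vertex_perm ie.2, ie.1))).foldl
          (fun d p => d.modify p.1 [] (· ++ [p.2])) PySem.Dict.empty := by
    rw [List.foldl_map]
  rw [hfold, PySem.Dict.getD_foldl_modify_append]
  simp only [PySem.Dict.getD_empty, List.nil_append, List.mem_map, List.mem_filter,
    List.mem_map, PySem.List.mem_enumerate_iff]
  constructor
  · rintro ⟨p, ⟨⟨ie, ⟨⟨m, hm, hie⟩, rfl⟩⟩, hk⟩, rfl⟩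
    refine ⟨m, hm, ?_, ?_⟩ <;> simp_all [beq_iff_eq]
  · rintro ⟨m, hm, rfl, hk⟩
    exact ⟨(pvMapKey vertex_perm edges[m], (m : Int)),
      ⟨⟨((m : Int), edges[m]), ⟨m, hm, by simp⟩, rfl⟩, by simp [hk]⟩, rfl⟩

-- a pass of writes at in-range indices, read back at n
theorem getElem?_foldl_pySetD (idxs : List Int) (out : List (Option Int)) (w : Option Int)
    (n : Nat) (h : ∀ i ∈ idxs, 0 ≤ i ∧ i.toNat < out.length) :
    (idxs.foldl (fun o i => PySem.List.pySetD o i w) out)[n]? =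
      if (n : Int) ∈ idxs then some w else out[n]? := by
  induction idxs generalizing out with
  | nil => simp
  | cons i rest ih =>
    have hi := h i (List.mem_cons_self)
    simp only [List.foldl_cons]
    rw [ih _ (fun j hj => by
      have := h j (List.mem_cons_of_mem _ hj)
      simpa [PySem.List.length_pySetD] using this)]
    by_cases hmem : (n : Int) ∈ rest
    · simp [hmem]
    · rw [if_neg hmem]
      rw [PySem.List.pySetD_of_nonneg _ _ hi.1]
      by_cases heq : (n : Int) = i
      · have : i.toNat = n := by omega
        simp [heq, this, this ▸ hi.2]
      · have hne : i.toNat ≠ n := by omega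
        simp [List.getElem?_set_ne hne, heq, hmem]

theorem length_foldl_pySetD (idxs : List Int) (out : List (Option Int)) (w : Option Int) :
    (idxs.foldl (fun o i => PySem.List.pySetD o i w) out).length = out.length := by
  induction idxs generalizing out with
  | nil => rfl
  | cons i rest ih => simp [List.foldl_cons, ih, PySem.List.length_pySetD]

-- B's scatter sweep, read back at n: the last target edge whose group contains n wins
theorem scatter_getElem? (edges : List (Int × Int)) (G : (Int × Int) → List Int)
    (hG : ∀ k i, i ∈ G k → 0 ≤ i ∧ i.toNat < edges.length)
    (ps : List (Int × (Int × Int))) (out : List (Option Int))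
    (hlen : out.length = edges.length) (n : Nat) :
    (ps.foldl (fun o je => (G (pvNormKey je.2)).foldl
        (fun o i => PySem.List.pySetD o i (some je.1)) o) out)[n]? =
      match ps.foldl (fun acc je => if (n : Int) ∈ G (pvNormKey je.2) then some je.1 else acc)
          none with
      | some j => some (some j)
      | none => out[n]? := by
  induction ps generalizing out with
  | nil => rfl
  | cons je rest ih =>
    simp only [List.foldl_cons]
    set out' := (G (pvNormKey je.2)).foldl (fun o i => PySem.List.pySetD o i (some je.1)) out
      with hout'
    have hlen' : out'.length = edges.length := by
      rw [hout', length_foldl_pySetD, hlen]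
    rw [ih out' hlen']
    rw [foldl_lastMatch_init rest (fun je => (n : Int) ∈ G (pvNormKey je.2)) (fun je => je.1)
        (if (n : Int) ∈ G (pvNormKey je.2) then some je.1 else none)]
    cases rest.foldl (fun acc je => if (n : Int) ∈ G (pvNormKey je.2) then some je.1 else acc)
        none with
    | some j => rfl
    | none =>
      simp only [hout']
      rw [getElem?_foldl_pySetD _ _ _ _ (fun i hi => by
        have := hG _ i hi; omega)]
      split <;> rfl

-- the two ports agree (everywhere, in fact)
theorem vertex_perm_to_edge_perm_eq (vertex_perm edges : List (Int × Int)) :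
    vertex_perm_to_edge_perm vertex_perm edges
      = vertex_perm_to_edge_perm_alt vertex_perm edges := by
  simp only [vertex_perm_to_edge_perm, vertex_perm_to_edge_perm_alt]
  have hG : ∀ (k : Int × Int) (i : Int),
      i ∈ ((PySem.List.enumerate edges 0).foldl
            (fun d ie => d.modify (pvMapKey vertex_perm ie.2) [] (· ++ [ie.1]))
            PySem.Dict.empty).getD k [] → 0 ≤ i ∧ i.toNat < edges.length := by
    intro k i hi
    obtain ⟨m, hm, rfl, -⟩ := (mem_groups vertex_perm edges i k).mp hi
    exact ⟨Int.natCast_nonneg m, by simpa using hm⟩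
  apply List.ext_getElem?
  intro n
  rw [List.getElem?_map, List.getElem?_map,
      scatter_getElem? edges _ hG _ _ (by simp) n]
  by_cases hn : n < edges.length
  · have hcond : ∀ je : Int × (Int × Int),
        ((n : Int) ∈ ((PySem.List.enumerate edges 0).foldl
            (fun d ie => d.modify (pvMapKey vertex_perm ie.2) [] (· ++ [ie.1]))
            PySem.Dict.empty).getD (pvNormKey je.2) [])
        ↔ pvNormKey je.2 = pvMapKey vertex_perm edges[n] := by
      intro je
      rw [mem_groups]
      constructor
      · rintro ⟨m, hm, hnm, hk⟩
        have hmn : m = n := by exact_mod_cast hnm.symm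
        subst hmn
        exact hk.symm
      · intro h
        exact ⟨n, hn, rfl, h.symm⟩
    rw [foldl_lastMatch_congr (PySem.List.enumerate edges 0)
        (fun je => (n : Int) ∈ ((PySem.List.enumerate edges 0).foldl
            (fun d ie => d.modify (pvMapKey vertex_perm ie.2) [] (· ++ [ie.1]))
            PySem.Dict.empty).getD (pvNormKey je.2) [])
        (fun je => pvNormKey je.2 = pvMapKey vertex_perm edges[n])
        hcond (fun je => je.1) none]
    rw [List.getElem?_eq_getElem hn]
    simp only [Option.map_some]
    rw [get?_foldl_insert_eq_lastMatch, PySem.Dict.get?_empty]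
    cases hF : (PySem.List.enumerate edges 0).foldl
        (fun acc je => if pvNormKey je.2 = pvMapKey vertex_perm edges[n] then some je.1 else acc)
        none with
    | some j => simp
    | none => simp [hn]
  · have hfalse : ∀ je : Int × (Int × Int),
        ((n : Int) ∈ ((PySem.List.enumerate edges 0).foldl
            (fun d ie => d.modify (pvMapKey vertex_perm ie.2) [] (· ++ [ie.1]))
            PySem.Dict.empty).getD (pvNormKey je.2) []) ↔ False := by
      intro je
      rw [mem_groups]
      constructor
      · rintro ⟨m, hm, hnm, -⟩
        have : m = n := by exact_mod_cast hnm.symm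
        omega
      · exact False.elim
    rw [foldl_lastMatch_congr (PySem.List.enumerate edges 0)
        (fun je => (n : Int) ∈ ((PySem.List.enumerate edges 0).foldl
            (fun d ie => d.modify (pvMapKey vertex_perm ie.2) [] (· ++ [ie.1]))
            PySem.Dict.empty).getD (pvNormKey je.2) [])
        (fun _ => False) hfalse (fun je => je.1) none]
    have hnone : (PySem.List.enumerate edges 0).foldl
        (fun (acc : Option Int) (je : Int × (Int × Int)) =>
          if False then some je.1 else acc) none = none := by
      induction PySem.List.enumerate edges 0 with
      | nil => rfl
      | cons x rest ih => simp only [List.foldl_cons, if_false]; exact ih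
    rw [hnone]
    simp [hn]

-- ===== VERDICT (by name: the statement is the Claim_ definition above) =====
theorem vertex_perm_to_edge_perm_spec : Claim_equal_vertex_perm_to_edge_perm := by
  intro vp edges _ _
  unfold Spec_vertex_perm_to_edge_perm
  exact vertex_perm_to_edge_perm_eq vp edges
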